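-- pv_equiv track=rewrite | github.com/jhinson20/bayesian-image | DataSimulation/10_10_triangle_square copy.py | shiftRight
-- ===== SOURCE A (Python) =====
-- _numRowCol = 10
--
-- def shiftRight(grid):
--     enable = False
--     outOfBounds = False
--     active = grid.count(1)
--
--     for i in range(len(grid)):
--         if grid[i] == 1:
--             if not enable:
--                 grid[i] = 0
--             enable = True
--         else:
--             if enable:
--                 grid[i] = 1
--                 if i % _numRowCol == 0:
--                     outOfBounds = True
--             enable = False
--
--     if active != grid.count(1):
--         outOfBounds = True
--
--     return grid, outOfBounds
-- ===== SOURCE B (Python) =====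
-- _numRowCol = 10
--
-- def shiftRight(grid):
--     # Run-based rewrite: scan for maximal runs of 1s and emit whole chunks
--     # (leading 0, the shifted run body, the landing 1), instead of A's per-cell
--     # state machine; out-of-bounds is decided per run end (falls off the end or
--     # lands on a column-0 boundary). Mutates grid in place like A.
--     n = len(grid)
--     new = []
--     oob = False
--     i = 0
--     while i < n:
--         if grid[i] != 1:
--             new.append(grid[i])
--             i += 1
--         else:
--             k = i
--             while k < n and grid[k] == 1:
--                 k += 1
--             m = k - i          # run length
--             new.append(0)
--             new.extend([1] * (m - 1))
--             if k == n:
--                 oob = True     # run falls off the end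
--             else:
--                 new.append(1)  # run lands on cell k
--                 if k % _numRowCol == 0:
--                     oob = True
--             i = k + 1
--     grid[:] = new
--     return grid, oob
-- ===== Notes on version B (the rewrite author's own statement) =====
-- stated objective: alternative
-- what changed: Replaces A's per-cell state machine (enable flag, in-place mutation during iteration, count-difference post-check) by a run-based scan: an inner loop finds each maximal run of 1s, whole chunks (leading 0, run body, landing 1) are emitted into a fresh list, and out-of-bounds is decided per run end (falls off the end or lands on a column-0 boundary).
import Mathlib
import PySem

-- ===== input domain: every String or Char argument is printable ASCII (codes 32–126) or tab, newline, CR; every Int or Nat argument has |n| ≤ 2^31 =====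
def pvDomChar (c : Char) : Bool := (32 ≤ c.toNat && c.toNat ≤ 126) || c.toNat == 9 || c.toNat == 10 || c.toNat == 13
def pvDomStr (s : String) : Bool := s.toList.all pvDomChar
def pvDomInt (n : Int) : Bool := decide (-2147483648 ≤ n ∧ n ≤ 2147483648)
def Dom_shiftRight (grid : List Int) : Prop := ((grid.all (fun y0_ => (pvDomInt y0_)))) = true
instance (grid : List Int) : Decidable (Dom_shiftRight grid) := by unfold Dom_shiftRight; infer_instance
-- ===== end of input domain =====

-- B replaces A's per-cell state machine by a run-based scan (find each maximal run of 1s,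
-- emit whole chunks, flag out-of-bounds at run ends); both mutate the argument list in
-- place in Python, so this equivalence is about the return value.

-- ===== PORT A =====
-- the body of A's for-loop over i, state = (grid, enable, outOfBounds)
def stepA (st : List Int × Bool × Bool) (i : Int) : List Int × Bool × Bool :=
  let g := st.1
  let enable := st.2.1
  let oob := st.2.2
  if PySem.List.pyGetD g i 0 = 1 then
    ((if !enable then PySem.List.pySetD g i 0 else g), true, oob)
  else
    if enable then
      (PySem.List.pySetD g i 1, false, (if PySem.Int.mod i 10 = 0 then true else oob))
    else
      (g, false, oob)

def shiftRight (grid : List Int) : List Int × Bool :=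
  let active := PySem.List.count grid 1
  let st := (PySem.List.pyRange 0 (grid.length : Int) 1).foldl stepA (grid, false, false)
  (st.1, if active ≠ PySem.List.count st.1 1 then true else st.2.2)

-- ===== PORT B =====
-- inner while: length of the leading run of 1s in the remaining cells
def runLenB : List Int → Nat
  | [] => 0
  | x :: xs => if x = 1 then runLenB xs + 1 else 0

-- outer while over the remaining cells; idx tracks the absolute index of the head
def goB : List Int → Nat → List Int × Bool
  | [], _ => ([], false)
  | x :: xs, idx =>
    if x ≠ 1 then
      let r := goB xs (idx + 1)
      (x :: r.1, r.2)
    else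
      let m := runLenB (x :: xs)          -- run length (≥ 1)
      let rest := (x :: xs).drop m
      if rest.isEmpty then
        (0 :: List.replicate (m - 1) 1, true)      -- run falls off the end
      else
        let r := goB ((x :: xs).drop (m + 1)) (idx + m + 1)
        (0 :: List.replicate (m - 1) 1 ++ 1 :: r.1,
          r.2 || decide ((idx + m) % 10 = 0))
  termination_by cells _ => cells.length
  decreasing_by all_goals (simp; try omega)

def shiftRight_alt (grid : List Int) : List Int × Bool :=
  let r := goB grid 0
  (r.1, r.2)

-- ===== PRECONDITION & SPEC =====
def Spec_shiftRight (grid : List Int) (out : List Int × Bool) : Prop := out = shiftRight_alt grid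
instance (grid : List Int) (out : List Int × Bool) : Decidable (Spec_shiftRight grid out) := by unfold Spec_shiftRight; infer_instance

-- ===== CLAIM (what is proved, stated in full; the proofs are below) =====
def Claim_equal_shiftRight : Prop := ∀ (grid : List Int), Dom_shiftRight grid → Spec_shiftRight grid (shiftRight grid)

-- ===== LEMMAS AND PROOFS =====

-- pure recursion computing A's loop on the remaining cells: index, enable, oob
def aGo (i : Nat) (e : Bool) (o : Bool) : List Int → List Int × Bool × Bool
  | [] => ([], e, o)
  | x :: xs =>
    if x = 1 then
      let r := aGo (i + 1) true o xs
      ((if !e then 0 else x) :: r.1, r.2)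
    else
      let r := aGo (i + 1) false (if e then (if i % 10 = 0 then true else o) else o) xs
      ((if e then 1 else x) :: r.1, r.2)

theorem aGo_cons_one (i : Nat) (e o : Bool) (x : Int) (xs : List Int) (hx : x = 1) :
    aGo i e o (x :: xs)
      = ((if !e then 0 else x) :: (aGo (i + 1) true o xs).1, (aGo (i + 1) true o xs).2) := by
  simp only [aGo, if_pos hx]

theorem aGo_cons_ne (i : Nat) (e o : Bool) (x : Int) (xs : List Int) (hx : ¬ x = 1) :
    aGo i e o (x :: xs)
      = ((if e then 1 else x)
            :: (aGo (i + 1) false (if e then (if i % 10 = 0 then true else o) else o) xs).1,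
          (aGo (i + 1) false (if e then (if i % 10 = 0 then true else o) else o) xs).2) := by
  simp only [aGo, if_neg hx]

theorem loopA (rest pre : List Int) (e o : Bool) :
    (PySem.List.pyRange (pre.length : Int) ((pre.length : Int) + (rest.length : Int)) 1).foldl
        stepA (pre ++ rest, e, o)
      = (pre ++ (aGo pre.length e o rest).1, (aGo pre.length e o rest).2) := by
  induction rest generalizing pre e o with
  | nil => simp [PySem.List.pyRange_one_eq_nil, aGo]
  | cons x xs ih =>
    rw [PySem.List.pyRange_one_cons (by simp only [List.length_cons]; push_cast; omega)]
    rw [List.foldl_cons]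
    by_cases hx : x = 1
    · have hstep : stepA (pre ++ x :: xs, e, o) ((pre.length : Int))
          = (pre ++ (if !e then 0 else x) :: xs, true, o) := by
        simp [stepA, hx]
        by_cases he : e <;> simp [he]
      rw [hstep]
      have harg : ((pre.length : Int) + 1) = (((pre ++ [(if !e then 0 else x)]).length : Int)) := by
        simp
      have harg2 : ((pre.length : Int) + ((x :: xs).length : Int))
          = (((pre ++ [(if !e then 0 else x)]).length : Int) + (xs.length : Int)) := by
        simp only [List.length_cons, List.length_append, List.length_nil]
        push_cast; omega
      rw [harg, harg2]
      have := ih (pre ++ [(if !e then 0 else x)]) true o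
      rw [List.append_assoc] at this
      simp only [List.singleton_append] at this
      rw [this]
      rw [aGo_cons_one _ _ _ _ _ hx]
      simp
    · have hdvd : ((10 : Int) ∣ (pre.length : Int)) ↔ pre.length % 10 = 0 := by omega
      have hstep : stepA (pre ++ x :: xs, e, o) ((pre.length : Int))
          = (pre ++ (if e then 1 else x) :: xs, false,
              (if e then (if pre.length % 10 = 0 then true else o) else o)) := by
        by_cases he : e
        · simp [stepA, hx, he, hdvd]
        · simp [stepA, hx, he]
      rw [hstep]
      have harg : ((pre.length : Int) + 1) = (((pre ++ [(if e then 1 else x)]).length : Int)) := by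
        simp
      have harg2 : ((pre.length : Int) + ((x :: xs).length : Int))
          = (((pre ++ [(if e then 1 else x)]).length : Int) + (xs.length : Int)) := by
        simp only [List.length_cons, List.length_append, List.length_nil]
        push_cast; omega
      rw [harg, harg2]
      have := ih (pre ++ [(if e then 1 else x)]) false
        (if e then (if pre.length % 10 = 0 then true else o) else o)
      rw [List.append_assoc] at this
      simp only [List.singleton_append] at this
      rw [this]
      rw [aGo_cons_ne _ _ _ _ _ hx]
      simp

-- count bookkeeping: a pending run (final enable) accounts for one extra 1
theorem aGo_count (g : List Int) (i : Nat) (e o : Bool) :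
    (aGo i e o g).1.count 1 + (if (aGo i e o g).2.1 then 1 else 0)
      = g.count 1 + (if e then 1 else 0) := by
  induction g generalizing i e o with
  | nil => simp [aGo]
  | cons x xs ih =>
    by_cases hx : x = 1
    · have h := ih (i + 1) true o
      rw [aGo_cons_one _ _ _ _ _ hx]
      cases he : e <;> cases hfe : (aGo (i + 1) true o xs).2.1 <;>
        simp [hx, hfe] at h ⊢ <;> omega
    · have h := ih (i + 1) false (if e then (if i % 10 = 0 then true else o) else o)
      rw [aGo_cons_ne _ _ _ _ _ hx]
      cases he : e <;>
        cases hfe : (aGo (i + 1) false (if e then (if i % 10 = 0 then true else o) else o) xs).2.1 <;>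
        simp [hx, he] at h ⊢ <;> omega

-- the oob parameter only gets OR-ed in
theorem aGo_o (g : List Int) (i : Nat) (e o : Bool) :
    aGo i e o g = ((aGo i e false g).1, (aGo i e false g).2.1, o || (aGo i e false g).2.2) := by
  induction g generalizing i e o with
  | nil => cases o <;> simp [aGo]
  | cons x xs ih =>
    by_cases hx : x = 1
    · rw [aGo_cons_one _ _ _ _ _ hx, aGo_cons_one _ _ _ _ _ hx, ih (i + 1) true o]
    · rw [aGo_cons_ne _ _ _ _ _ hx, aGo_cons_ne _ _ _ _ _ hx]
      cases e
      · simp only [Bool.false_eq_true, if_false]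
        rw [ih (i + 1) false o]
      · simp only [if_true]
        by_cases hi : i % 10 = 0
        · simp only [if_pos hi]
          rw [ih (i + 1) false true, ih (i + 1) false false]
          simp
        · simp only [if_neg hi]
          rw [ih (i + 1) false o]

-- A keeps a run of 1s (past its first cell) unchanged
theorem aGo_run (t : Nat) (rest : List Int) (i : Nat) (o : Bool) :
    aGo i true o (List.replicate t 1 ++ rest)
      = (List.replicate t 1 ++ (aGo (i + t) true o rest).1, (aGo (i + t) true o rest).2) := by
  induction t generalizing i with
  | zero => simp
  | succ t ih =>
    rw [List.replicate_succ, List.cons_append, aGo_cons_one _ _ _ _ _ rfl, ih (i + 1)]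
    have harith : i + 1 + t = i + (t + 1) := by omega
    rw [harith]
    simp

-- decomposition by the leading run of 1s
theorem runLenB_decomp (g : List Int) :
    g = List.replicate (runLenB g) 1 ++ g.drop (runLenB g) := by
  induction g with
  | nil => simp [runLenB]
  | cons x xs ih =>
    by_cases hx : x = 1
    · simp only [runLenB, if_pos hx, List.replicate_succ, List.cons_append, List.drop_succ_cons]
      rw [hx]; exact congrArg _ ih
    · simp [runLenB, hx]

theorem runLenB_stop (g : List Int) (y : Int) (ys : List Int)
    (h : g.drop (runLenB g) = y :: ys) : y ≠ 1 := by
  induction g generalizing ys with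
  | nil => simp [runLenB] at h
  | cons x xs ih =>
    by_cases hx : x = 1
    · simp only [runLenB, if_pos hx, List.drop_succ_cons] at h
      exact ih _ h
    · simp only [runLenB, if_neg hx, List.drop_zero] at h
      cases h; exact hx

-- main bridge: B's run-based scan computes A's loop result (with the pending-run
-- flag folded into the out-of-bounds bit)
theorem goB_eq_aGo (n : Nat) :
    ∀ (g : List Int), g.length ≤ n → ∀ (i : Nat),
      goB g i = ((aGo i false false g).1, (aGo i false false g).2.2 || (aGo i false false g).2.1) := by
  induction n with
  | zero =>
    intro g hg i
    have : g = [] := by cases g <;> simp_all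
    subst this; simp [goB, aGo]
  | succ n ih =>
    intro g hg i
    cases g with
    | nil => simp [goB, aGo]
    | cons x xs =>
      by_cases hx : x = 1
      · -- run case
        obtain ⟨m, hmdef⟩ : ∃ m, runLenB (x :: xs) = m := ⟨_, rfl⟩
        have hm : m = runLenB xs + 1 := by rw [← hmdef]; simp [runLenB, hx]
        have hm1 : 1 ≤ m := by omega
        have hdecomp := runLenB_decomp (x :: xs)
        rw [hmdef] at hdecomp
        have hrep : x :: xs = 1 :: (List.replicate (m - 1) 1 ++ (x :: xs).drop m) := by
          conv_lhs => rw [hdecomp]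
          have : List.replicate m (1 : Int) = 1 :: List.replicate (m - 1) 1 := by
            cases m with
            | zero => omega
            | succ k => simp [List.replicate_succ]
          rw [this]; simp
        have hA : aGo i false false (x :: xs)
            = (0 :: List.replicate (m - 1) 1 ++ (aGo (i + m) true false ((x :: xs).drop m)).1,
               (aGo (i + m) true false ((x :: xs).drop m)).2) := by
          conv_lhs => rw [hrep]
          rw [aGo_cons_one _ _ _ _ _ rfl, aGo_run (m - 1) _ (i + 1) false]
          have : i + 1 + (m - 1) = i + m := by omega
          rw [this]; simp
        rw [hA]
        cases hrest : (x :: xs).drop m with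
        | nil =>
          have hB : goB (x :: xs) i = (0 :: List.replicate (m - 1) 1, true) := by
            rw [goB, if_neg (not_not_intro hx), hmdef]
            simp only [hrest, List.isEmpty_nil, if_true]
          rw [hB]
          simp [aGo]
        | cons y ys =>
          have hy : y ≠ 1 := runLenB_stop (x :: xs) y ys (by rw [hmdef]; exact hrest)
          have hdrop1 : (x :: xs).drop (m + 1) = ys := by
            have h1 : (x :: xs).drop (m + 1) = ((x :: xs).drop m).drop 1 := by
              rw [List.drop_drop]
            rw [h1, hrest, List.drop_one, List.tail_cons]
          have hys : ys.length ≤ n := by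
            have hlen := congrArg List.length hdrop1
            simp only [List.length_drop, List.length_cons] at hlen
            simp only [List.length_cons] at hg
            omega
          have hB : goB (x :: xs) i
              = (0 :: List.replicate (m - 1) 1 ++ 1 :: (goB ys (i + m + 1)).1,
                 (goB ys (i + m + 1)).2 || decide ((i + m) % 10 = 0)) := by
            rw [goB, if_neg (not_not_intro hx), hmdef]
            simp only [hrest, hdrop1, List.isEmpty_cons, if_false, Bool.false_eq_true]
          rw [hB, ih ys hys (i + m + 1), aGo_cons_ne _ _ _ _ _ hy]
          have hif : (if (true : Bool) = true then (if (i + m) % 10 = 0 then true else false)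
                else (false : Bool)) = decide ((i + m) % 10 = 0) := by
            by_cases hi : (i + m) % 10 = 0 <;> simp [hi]
          rw [hif]
          cases hd : decide ((i + m) % 10 = 0)
          · cases h1 : (aGo (i + m + 1) false false ys).2.1 <;> simp
          · rw [aGo_o ys (i + m + 1) false true]
            cases h1 : (aGo (i + m + 1) false false ys).2.1 <;> simp
      · -- non-run case
        have hA := aGo_cons_ne i false false x xs hx
        have hB : goB (x :: xs) i = (x :: (goB xs (i + 1)).1, (goB xs (i + 1)).2) := by
          rw [goB]; simp [hx]
        rw [hB, hA, ih xs (by simp at hg; omega) (i + 1)]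
        simp

-- ===== VERDICT (by name: the statement is the Claim_ definition above) =====
theorem shiftRight_spec : Claim_equal_shiftRight := by
  intro grid _
  unfold Spec_shiftRight shiftRight shiftRight_alt
  have hl := loopA grid [] false false
  simp only [List.length_nil, Nat.cast_zero, List.nil_append, zero_add] at hl
  rw [hl]
  have hc := aGo_count grid 0 false false
  have hB := goB_eq_aGo grid.length grid le_rfl 0
  rw [hB]
  have hA2 : (if PySem.List.count grid 1 ≠ PySem.List.count (aGo 0 false false grid).1 1
      then true else (aGo 0 false false grid).2.2)
      = ((aGo 0 false false grid).2.1 || (aGo 0 false false grid).2.2) := by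
    cases hfe : (aGo 0 false false grid).2.1 <;>
      simp [hfe, PySem.List.count_eq] at hc ⊢ <;> omega
  refine Prod.ext rfl ?_
  simp only [hA2]
  exact Bool.or_comm _ _
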